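-- pv_equiv track=rewrite | github.com/HubertFraczek/boikwd-labolatoria | lab5/zad1.py | isUogolniona
-- ===== SOURCE A (Python) =====
-- def isUogolniona(M):
--     if isTurniejowa(M):
--         for i in range(len(M)):
--             for j in range(len(M[0])):
--                 if i != j and M[i][j] == 0:
--                     return True
--         return False
--     return False
--
-- def isTurniejowa(M):
--     for i in range(len(M)):
--         for j in range(len(M[0])):
--             if (M[i][j] != -M[j][i]):
--                 return False
--     return True
-- ===== SOURCE B (Python) =====
-- def isUogolniona(M):
--     n = len(M)
--     found = False
--     for i in range(n):
--         for j in range(i, n):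
--             if M[i][j] != -M[j][i]:
--                 return False
--             if i < j and M[i][j] == 0:
--                 found = True
--     return found
-- ===== Notes on version B (the rewrite author's own statement) =====
-- stated objective: alternative
-- what changed: One pass over the upper triangle only (antisymmetry of a pair (i,j)/(j,i) is checked once) with a found-zero flag, replacing A's two full-matrix passes (verify antisymmetry, then search for an off-diagonal zero).
-- outside the precondition, e.g. on isUogolniona([[]]): A returns False, B raises IndexError; on isUogolniona([[0, 1], [-1, 2, 2], [1]]): A returns False, B raises IndexError
import Mathlib
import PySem

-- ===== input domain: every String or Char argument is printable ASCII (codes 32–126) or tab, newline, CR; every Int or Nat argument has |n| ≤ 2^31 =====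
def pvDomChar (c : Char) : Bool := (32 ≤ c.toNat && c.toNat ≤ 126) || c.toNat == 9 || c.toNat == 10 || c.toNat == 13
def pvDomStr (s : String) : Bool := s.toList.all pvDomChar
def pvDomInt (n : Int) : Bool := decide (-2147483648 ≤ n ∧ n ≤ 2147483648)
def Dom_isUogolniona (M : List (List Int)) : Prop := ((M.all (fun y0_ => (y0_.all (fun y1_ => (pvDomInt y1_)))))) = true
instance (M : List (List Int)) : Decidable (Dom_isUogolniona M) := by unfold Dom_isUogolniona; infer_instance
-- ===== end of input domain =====

-- B makes one pass over the upper triangle with a found-zero flag instead of A's two full-matrix passes.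
-- ===== PORT A =====
-- M[i][j] ported as getD; exact for the in-range non-negative indices that Pre_ (square matrix) guarantees.
def pvGet (M : List (List Int)) (i j : Nat) : Int := (M.getD i []).getD j 0

def isTurniejowa (M : List (List Int)) : Bool :=
  (List.range M.length).all fun i =>
    (List.range (M.headD []).length).all fun j =>
      pvGet M i j == - pvGet M j i

def isUogolniona (M : List (List Int)) : Bool :=
  if isTurniejowa M then
    (List.range M.length).any fun i =>
      (List.range (M.headD []).length).any fun j =>
        decide (i ≠ j) && (pvGet M i j == 0)
  else false

-- ===== PORT B =====
-- inner loop `for j in range(i, n)`: the early `return False` on a mismatch is the `none` result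
def altRow (M : List (List Int)) (i : Nat) (found : Bool) : List Nat → Option Bool
  | [] => some found
  | j :: js =>
    if pvGet M i j != - pvGet M j i then none
    else altRow M i (found || (decide (i < j) && (pvGet M i j == 0))) js

-- outer loop `for i in range(n)`
def altGo (M : List (List Int)) (found : Bool) : List Nat → Bool
  | [] => found
  | i :: is =>
    match altRow M i found (List.range' i (M.length - i)) with
    | none => false
    | some f => altGo M f is

def isUogolniona_alt (M : List (List Int)) : Bool :=
  altGo M false (List.range M.length)

-- ===== PRECONDITION & SPEC =====
-- Pre_ admits square matrices and any matrix whose top-left entry is nonzero (both programs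
-- reject the latter at the very first comparison); the remaining non-square matrices are
-- excluded because A may raise IndexError on them, or return an early False that is an
-- accident of its full-rectangle scan order, while B's triangular scan raises there.
def Pre_isUogolniona (M : List (List Int)) : Prop :=
  (∀ row ∈ M, row.length = M.length) ∨ (M.headD []).headD 0 ≠ 0
instance (M : List (List Int)) : Decidable (Pre_isUogolniona M) := by unfold Pre_isUogolniona; infer_instance
def pvWitness_isUogolniona : List (List Int) := [[0, 2], [-2, 0]]

def Spec_isUogolniona (M : List (List Int)) (out : Bool) : Prop := out = isUogolniona_alt M
instance (M : List (List Int)) (out : Bool) : Decidable (Spec_isUogolniona M out) := by unfold Spec_isUogolniona; infer_instance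

-- ===== CLAIM (what is proved, stated in full; the proofs are below) =====
def Claim_equal_isUogolniona : Prop := ∀ (M : List (List Int)), Dom_isUogolniona M → Pre_isUogolniona M → Spec_isUogolniona M (isUogolniona M)

-- ===== LEMMAS AND PROOFS =====

lemma bool_ext {a b : Bool} (h : a = true ↔ b = true) : a = b := by
  cases a <;> cases b <;> simp_all

lemma altRow_eq (M : List (List Int)) (i : Nat) (found : Bool) (js : List Nat) :
    altRow M i found js =
      if js.any (fun j => pvGet M i j != - pvGet M j i) then none
      else some (found || js.any fun j => decide (i < j) && (pvGet M i j == 0)) := by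
  induction js generalizing found with
  | nil => simp [altRow]
  | cons j js ih =>
    by_cases h : pvGet M i j = - pvGet M j i
    · simp [altRow, h, ih, Bool.or_assoc]
    · simp [altRow, h]

lemma altGo_eq (M : List (List Int)) (found : Bool) (is : List Nat) :
    altGo M found is =
      if is.any (fun i => (List.range' i (M.length - i)).any fun j => pvGet M i j != - pvGet M j i) then false
      else found || is.any fun i => (List.range' i (M.length - i)).any fun j => decide (i < j) && (pvGet M i j == 0) := by
  induction is generalizing found with
  | nil => simp [altGo]
  | cons i is ih =>
    by_cases hb : ((List.range' i (M.length - i)).any fun j => pvGet M i j != - pvGet M j i) = true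
    · simp [altGo, altRow_eq, hb]
    · by_cases hc : (is.any fun i => (List.range' i (M.length - i)).any fun j => pvGet M i j != - pvGet M j i) = true
      · simp [altGo, altRow_eq, hb, ih, hc]
      · simp [altGo, altRow_eq, hb, ih, hc, Bool.or_assoc]

theorem port_eq_sq (M : List (List Int)) (hPre : ∀ row ∈ M, row.length = M.length) :
    isUogolniona M = isUogolniona_alt M := by
  have hhead : (M.headD []).length = M.length := by
    cases M with
    | nil => simp
    | cons r t => simpa using hPre r (List.mem_cons_self)
  unfold isUogolniona isUogolniona_alt isTurniejowa
  rw [altGo_eq, hhead]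
  set n := M.length
  by_cases hT : ∀ i < n, ∀ j < n, pvGet M i j = - pvGet M j i
  · have h1 : ((List.range n).all fun i => (List.range n).all fun j => pvGet M i j == - pvGet M j i) = true := by
      simp only [List.all_eq_true, List.mem_range, beq_iff_eq]
      exact hT
    have h2 : ((List.range n).any fun i => (List.range' i (n - i)).any fun j => pvGet M i j != - pvGet M j i) = false := by
      rw [Bool.eq_false_iff]
      simp only [ne_eq, List.any_eq_true, List.mem_range, List.mem_range'_1, bne_iff_ne]
      rintro ⟨i, hi, j, ⟨hij, hjn⟩, hne⟩
      exact hne (hT i hi j (by omega))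
    rw [if_pos h1, if_neg (by simp [h2]), Bool.false_or]
    apply bool_ext
    simp only [List.any_eq_true, List.mem_range, List.mem_range'_1, Bool.and_eq_true,
      decide_eq_true_eq, beq_iff_eq]
    constructor
    · rintro ⟨i, hi, j, hj, hne, h0⟩
      rcases Nat.lt_or_ge i j with hij | hij
      · exact ⟨i, hi, j, ⟨by omega, by omega⟩, hij, h0⟩
      · have hs := hT i hi j hj
        exact ⟨j, hj, i, ⟨by omega, by omega⟩, by omega, by omega⟩
    · rintro ⟨i, hi, j, ⟨hij, hjn⟩, hlt, h0⟩
      exact ⟨i, hi, j, by omega, by omega, h0⟩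
  · have h1 : ((List.range n).all fun i => (List.range n).all fun j => pvGet M i j == - pvGet M j i) = false := by
      rw [Bool.eq_false_iff]
      intro hAll
      simp only [List.all_eq_true, List.mem_range, beq_iff_eq] at hAll
      exact hT fun i hi j hj => hAll i hi j hj
    have h2 : ((List.range n).any fun i => (List.range' i (n - i)).any fun j => pvGet M i j != - pvGet M j i) = true := by
      simp only [List.any_eq_true, List.mem_range, List.mem_range'_1, bne_iff_ne]
      push Not at hT
      obtain ⟨i, hi, j, hj, hne⟩ := hT
      rcases Nat.lt_or_ge j i with hij | hij
      · exact ⟨j, by omega, i, ⟨by omega, by omega⟩, fun he => hne (by omega)⟩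
      · exact ⟨i, hi, j, ⟨hij, by omega⟩, hne⟩
    rw [if_neg (by simp [h1]), if_pos h2]

theorem port_eq (M : List (List Int)) (hPre : Pre_isUogolniona M) :
    isUogolniona M = isUogolniona_alt M := by
  rcases hPre with hsq | hx
  · exact port_eq_sq M hsq
  · rcases M with _ | ⟨r, t⟩
    · simp at hx
    · rcases r with _ | ⟨x, r'⟩
      · simp at hx
      · have hx0 : x ≠ 0 := by simpa using hx
        have hg : pvGet ((x :: r') :: t) 0 0 = x := rfl
        have hA : isTurniejowa ((x :: r') :: t) = false := by
          rw [Bool.eq_false_iff]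
          intro hAll
          unfold isTurniejowa at hAll
          simp only [List.all_eq_true, List.mem_range, beq_iff_eq] at hAll
          have h00 := hAll 0 (by simp) 0 (by simp)
          rw [hg] at h00
          omega
        have hB : ((List.range ((x :: r') :: t).length).any fun i =>
            (List.range' i (((x :: r') :: t).length - i)).any fun j =>
              pvGet ((x :: r') :: t) i j != - pvGet ((x :: r') :: t) j i) = true := by
          simp only [List.any_eq_true, List.mem_range, List.mem_range'_1, bne_iff_ne]
          exact ⟨0, by simp, 0, ⟨Nat.le_refl 0, by simp⟩, by rw [hg]; omega⟩
        unfold isUogolniona isUogolniona_alt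
        rw [altGo_eq, if_pos hB]
        simp [hA]

-- ===== VERDICT (by name: the statement is the Claim_ definition above) =====
theorem isUogolniona_spec : Claim_equal_isUogolniona := by
  intro M _ hPre
  exact port_eq M hPre
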